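-- pv_equiv track=rewrite | github.com/taco-project/FlexKV | flexkv/transfer/utils.py | split_contiguous_blocks
-- ===== SOURCE A (Python) =====
-- from typing import Tuple, List, Dict, Optional, Any
--
-- def split_contiguous_blocks(
--     src_list: List[int], dst_list: List[int]
-- )-> List[Dict[str, List[int]]]:
--     if not src_list:
--         return []
--
--     result = []
--     current_src = [src_list[0]]
--     current_dst = [dst_list[0]]
--
--     for i in range(1, len(src_list)):
--         if src_list[i] == src_list[i - 1] + 1:
--             current_src.append(src_list[i])
--             current_dst.append(dst_list[i])
--         else:
--             result.append({"src": current_src, "dst": current_dst})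
--             current_src = [src_list[i]]
--             current_dst = [dst_list[i]]
--
--     result.append({"src": current_src, "dst": current_dst})
--     return result
-- ===== SOURCE B (Python) =====
-- from typing import List, Dict
--
-- def split_contiguous_blocks(
--     src_list: List[int], dst_list: List[int]
-- ) -> List[Dict[str, List[int]]]:
--     if not src_list:
--         return []
--     n = len(src_list)
--     cuts = [0] + [i for i in range(1, n) if src_list[i] != src_list[i - 1] + 1] + [n]
--     return [
--         {"src": src_list[a:b], "dst": dst_list[a:b]}
--         for a, b in zip(cuts, cuts[1:])
--     ]
-- ===== Notes on version B (the rewrite author's own statement) =====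
-- stated objective: alternative
-- what changed: B first scans src_list once to collect the boundary cut indices and then materializes each segment with list slices, instead of A's single loop that appends element by element and flushes a growing current block at each break.
import Mathlib
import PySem

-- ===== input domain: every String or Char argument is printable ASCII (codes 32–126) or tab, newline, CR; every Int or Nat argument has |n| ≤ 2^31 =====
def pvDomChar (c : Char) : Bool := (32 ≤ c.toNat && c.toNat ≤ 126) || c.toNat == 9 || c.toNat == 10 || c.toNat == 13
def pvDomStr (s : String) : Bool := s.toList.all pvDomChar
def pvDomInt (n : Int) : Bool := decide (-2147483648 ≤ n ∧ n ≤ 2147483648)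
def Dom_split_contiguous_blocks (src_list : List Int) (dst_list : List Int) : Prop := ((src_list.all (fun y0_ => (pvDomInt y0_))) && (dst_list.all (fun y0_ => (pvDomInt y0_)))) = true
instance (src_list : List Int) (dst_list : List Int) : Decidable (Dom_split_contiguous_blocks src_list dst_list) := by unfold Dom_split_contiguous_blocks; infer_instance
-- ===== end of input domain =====

-- B separates finding the cut points from materializing the segments (boundary scan + slices)
-- instead of A's element-by-element appends; objective: alternative decomposition, same cost.

-- ===== PORT A =====
-- loop body of A's for-loop, as a named helper
def pvStepA (src_list dst_list : List Int)
    (st : List (List (String × List Int)) × List Int × List Int) (i : Int) :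
    List (List (String × List Int)) × List Int × List Int :=
  if PySem.List.pyGetD src_list i 0 = PySem.List.pyGetD src_list (i - 1) 0 + 1 then
    (st.1, st.2.1 ++ [PySem.List.pyGetD src_list i 0], st.2.2 ++ [PySem.List.pyGetD dst_list i 0])
  else
    (st.1 ++ [[("src", st.2.1), ("dst", st.2.2)]],
     [PySem.List.pyGetD src_list i 0], [PySem.List.pyGetD dst_list i 0])

def split_contiguous_blocks (src_list : List Int) (dst_list : List Int) : List (List (String × List Int)) :=
  if src_list = [] then []
  else
    let st := (PySem.List.pyRange 1 (src_list.length : Int) 1).foldl (pvStepA src_list dst_list)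
      ([], [PySem.List.pyGetD src_list 0 0], [PySem.List.pyGetD dst_list 0 0])
    st.1 ++ [[("src", st.2.1), ("dst", st.2.2)]]

-- ===== PORT B =====
-- one output segment {"src": src[a:b], "dst": dst[a:b]}, as a named helper
def pvSegB (src_list dst_list : List Int) (ab : Int × Int) : List (String × List Int) :=
  [("src", PySem.List.slice src_list (some ab.1) (some ab.2)),
   ("dst", PySem.List.slice dst_list (some ab.1) (some ab.2))]

def split_contiguous_blocks_alt (src_list : List Int) (dst_list : List Int) : List (List (String × List Int)) :=
  if src_list = [] then []
  else
    let n : Int := src_list.length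
    let cuts : List Int :=
      0 :: ((PySem.List.pyRange 1 n 1).filter
        (fun i => PySem.List.pyGetD src_list i 0 ≠ PySem.List.pyGetD src_list (i - 1) 0 + 1)) ++ [n]
    (cuts.zip (PySem.List.slice cuts (some 1) none)).map (pvSegB src_list dst_list)

-- ===== PRECONDITION & SPEC =====
-- Pre_ excludes exactly the inputs on which A raises IndexError: a nonempty src_list with a shorter dst_list.
def Pre_split_contiguous_blocks (src_list : List Int) (dst_list : List Int) : Prop :=
  src_list = [] ∨ src_list.length ≤ dst_list.length
instance (src_list : List Int) (dst_list : List Int) : Decidable (Pre_split_contiguous_blocks src_list dst_list) := by unfold Pre_split_contiguous_blocks; infer_instance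

def pvWitness_split_contiguous_blocks : List Int × List Int := ([1, 2, 5, 6], [10, 11, 3, 4])

def Spec_split_contiguous_blocks (src_list : List Int) (dst_list : List Int) (out : List (List (String × List Int))) : Prop := out = split_contiguous_blocks_alt src_list dst_list
instance (src_list : List Int) (dst_list : List Int) (out : List (List (String × List Int))) : Decidable (Spec_split_contiguous_blocks src_list dst_list out) := by unfold Spec_split_contiguous_blocks; infer_instance

-- ===== CLAIM (what is proved, stated in full; the proofs are below) =====
def Claim_equal_split_contiguous_blocks : Prop := ∀ (src_list : List Int) (dst_list : List Int), Dom_split_contiguous_blocks src_list dst_list → Pre_split_contiguous_blocks src_list dst_list → Spec_split_contiguous_blocks src_list dst_list (split_contiguous_blocks src_list dst_list)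


-- ===== LEMMAS AND PROOFS =====

theorem pv_slice_snoc (xs : List Int) (a k : Nat) (hk : k < xs.length) (hak : a ≤ k) :
    PySem.List.slice xs (some (a : Int)) (some (k : Int)) ++ [PySem.List.pyGetD xs (k : Int) 0]
      = PySem.List.slice xs (some (a : Int)) (some ((k : Int) + 1)) := by
  have hcast : ((k : Int) + 1) = (((k + 1 : Nat)) : Int) := by push_cast; ring
  rw [hcast, PySem.List.slice_natCast, PySem.List.slice_natCast, PySem.List.pyGetD_natCast]
  have h1 : k + 1 - a = (k - a) + 1 := by omega
  rw [h1, List.take_add_one]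
  have h2 : (xs.drop a)[k - a]? = some xs[k] := by
    rw [List.getElem?_drop]
    have h3 : a + (k - a) = k := by omega
    rw [h3, List.getElem?_eq_getElem hk]
  rw [h2]
  simp [List.getD_eq_getElem?_getD, List.getElem?_eq_getElem hk]

theorem pv_slice_single (xs : List Int) (k : Nat) (hk : k < xs.length) :
    [PySem.List.pyGetD xs (k : Int) 0] = PySem.List.slice xs (some (k : Int)) (some ((k : Int) + 1)) := by
  have hcast : ((k : Int) + 1) = (((k + 1 : Nat)) : Int) := by push_cast; ring
  rw [hcast, PySem.List.slice_natCast, PySem.List.pyGetD_natCast]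
  have h5 : k + 1 - k = 1 := by omega
  rw [h5]
  have h6 : List.take 1 (List.drop k xs) = [xs[k]] := by
    rw [List.take_one, List.head?_drop, List.getElem?_eq_getElem hk]
    rfl
  rw [h6]
  simp [List.getD_eq_getElem?_getD, List.getElem?_eq_getElem hk]

def pvFinish (st : List (List (String × List Int)) × List Int × List Int) :
    List (List (String × List Int)) :=
  st.1 ++ [[("src", st.2.1), ("dst", st.2.2)]]

theorem main_invariant (src dst : List Int) (hd : src.length ≤ dst.length) :
    ∀ (m k a : Nat) (res : List (List (String × List Int))),
      a < k → k ≤ src.length → src.length - k = m →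
      pvFinish ((PySem.List.pyRange (k : Int) (src.length : Int) 1).foldl (pvStepA src dst)
        (res, PySem.List.slice src (some (a : Int)) (some (k : Int)),
              PySem.List.slice dst (some (a : Int)) (some (k : Int))))
      = res ++ ((((a : Int) :: ((PySem.List.pyRange (k : Int) (src.length : Int) 1).filter
            (fun i => PySem.List.pyGetD src i 0 ≠ PySem.List.pyGetD src (i - 1) 0 + 1)) ++ [(src.length : Int)])).zip
          (((PySem.List.pyRange (k : Int) (src.length : Int) 1).filter
            (fun i => PySem.List.pyGetD src i 0 ≠ PySem.List.pyGetD src (i - 1) 0 + 1)) ++ [(src.length : Int)])).map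
          (pvSegB src dst) := by
  intro m
  induction m with
  | zero =>
    intro k a res hak hkn hm
    have hk : k = src.length := by omega
    subst hk
    rw [PySem.List.pyRange_one]
    simp [pvFinish, pvSegB]
  | succ m ih =>
    intro k a res hak hkn hm
    have hklt : (k : Int) < (src.length : Int) := by exact_mod_cast (by omega : k < src.length)
    have hkd : k < dst.length := by omega
    have hks : k < src.length := by omega
    rw [PySem.List.pyRange_one_cons hklt]
    simp only [List.foldl_cons, List.filter_cons]
    by_cases hp : PySem.List.pyGetD src (k : Int) 0 = PySem.List.pyGetD src ((k : Int) - 1) 0 + 1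
    · have hstep : pvStepA src dst
          (res, PySem.List.slice src (some (a : Int)) (some (k : Int)),
                PySem.List.slice dst (some (a : Int)) (some (k : Int))) (k : Int)
          = (res, PySem.List.slice src (some (a : Int)) (some ((k : Int) + 1)),
                  PySem.List.slice dst (some (a : Int)) (some ((k : Int) + 1))) := by
        unfold pvStepA
        rw [if_pos hp]
        simp only [pv_slice_snoc src a k hks (by omega), pv_slice_snoc dst a k hkd (by omega)]
      rw [hstep]
      have hc : ((k : Int) + 1) = (((k + 1 : Nat)) : Int) := by push_cast; ring
      rw [hc]
      have := ih (k + 1) a res (by omega) (by omega) (by omega)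
      rw [this]
      simp [hp]
    · have hstep : pvStepA src dst
          (res, PySem.List.slice src (some (a : Int)) (some (k : Int)),
                PySem.List.slice dst (some (a : Int)) (some (k : Int))) (k : Int)
          = (res ++ [pvSegB src dst ((a : Int), (k : Int))],
             PySem.List.slice src (some (k : Int)) (some ((k : Int) + 1)),
             PySem.List.slice dst (some (k : Int)) (some ((k : Int) + 1))) := by
        unfold pvStepA pvSegB
        rw [if_neg hp]
        simp only [pv_slice_single src k hks, pv_slice_single dst k hkd]
      rw [hstep]
      have hc : ((k : Int) + 1) = (((k + 1 : Nat)) : Int) := by push_cast; ring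
      rw [hc]
      have := ih (k + 1) k (res ++ [pvSegB src dst ((a : Int), (k : Int))]) (by omega) (by omega) (by omega)
      rw [this]
      have hp2 : ¬ (src[k]?.getD 0 = PySem.List.pyGetD src ((k : Int) - 1) 0 + 1) := by
        simpa [PySem.List.pyGetD_natCast, List.getD_eq_getElem?_getD] using hp
      simp [hp2, List.zip_cons_cons]

theorem split_contiguous_blocks_spec : Claim_equal_split_contiguous_blocks := by
  intro src dst _ hpre
  unfold Spec_split_contiguous_blocks split_contiguous_blocks split_contiguous_blocks_alt
  by_cases hs : src = []
  · simp [hs]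
  · rw [if_neg hs, if_neg hs]
    have hlen : 1 ≤ src.length := by
      cases src with
      | nil => exact absurd rfl hs
      | cons x xs => simp
    have hd : src.length ≤ dst.length := by
      rcases hpre with h | h
      · exact absurd h hs
      · exact h
    have inv := main_invariant src dst hd (src.length - 1) 1 0 [] (by omega) (by omega) (by omega)
    simp only [Nat.cast_one, Nat.cast_zero] at inv
    have hsrc : PySem.List.slice src (some 0) (some 1) = [PySem.List.pyGetD src 0 0] := by
      have h0 := pv_slice_single src 0 (by omega)
      simpa using h0.symm
    have hdst : PySem.List.slice dst (some 0) (some 1) = [PySem.List.pyGetD dst 0 0] := by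
      have h0 := pv_slice_single dst 0 (by omega)
      simpa using h0.symm
    rw [hsrc, hdst] at inv
    unfold pvFinish at inv
    simpa [PySem.List.slice_from_one] using inv
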